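-- pv_equiv track=rewrite | github.com/HIROMU1015/Evaluation_numGate_highorder_DF | src/trotterlib/qiskit_time_evolution_utils.py | _greedy_disjoint_layer_count
-- ===== SOURCE A (Python) =====
-- from typing import Any, Callable, Iterable, List, Sequence, Tuple
--
-- def _greedy_disjoint_layer_count(supports: Sequence[frozenset[int]]) -> int:
--     """Greedy layer packing for supports (disjoint supports can share a layer)."""
--     layers: list[set[int]] = []
--     for supp in supports:
--         placed = False
--         for used in layers:
--             if used.intersection(supp):
--                 continue
--             used.update(supp)
--             placed = True
--             break
--         if not placed:
--             layers.append(set(supp))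
--     return len(layers)
-- ===== SOURCE B (Python) =====
-- def _greedy_disjoint_layer_count(supports):
--     """Greedy first-fit layer count via a qubit -> occupied-layer-indices index."""
--     occupied = {}  # qubit -> set of layer indices containing that qubit
--     layer_count = 0
--     for supp in supports:
--         forbidden = set()
--         for q in supp:
--             forbidden |= occupied.get(q, set())
--         i = next((j for j in range(layer_count) if j not in forbidden), None)
--         if i is None:
--             i = layer_count
--             layer_count += 1
--         for q in supp:
--             occupied.setdefault(q, set()).add(i)
--     return layer_count
-- ===== Notes on version B (the rewrite author's own statement) =====
-- stated objective: faster
-- what changed: B replaces A's list of per-layer qubit sets (each support scanned against every existing layer with a set intersection) by an inverted index mapping each qubit to the set of layer indices it occupies; the first-fit layer is the smallest index outside the union of the support's occupied-index sets, so the per-support cost drops from one intersection per existing layer to one lookup per qubit plus one index scan.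
import Mathlib
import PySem

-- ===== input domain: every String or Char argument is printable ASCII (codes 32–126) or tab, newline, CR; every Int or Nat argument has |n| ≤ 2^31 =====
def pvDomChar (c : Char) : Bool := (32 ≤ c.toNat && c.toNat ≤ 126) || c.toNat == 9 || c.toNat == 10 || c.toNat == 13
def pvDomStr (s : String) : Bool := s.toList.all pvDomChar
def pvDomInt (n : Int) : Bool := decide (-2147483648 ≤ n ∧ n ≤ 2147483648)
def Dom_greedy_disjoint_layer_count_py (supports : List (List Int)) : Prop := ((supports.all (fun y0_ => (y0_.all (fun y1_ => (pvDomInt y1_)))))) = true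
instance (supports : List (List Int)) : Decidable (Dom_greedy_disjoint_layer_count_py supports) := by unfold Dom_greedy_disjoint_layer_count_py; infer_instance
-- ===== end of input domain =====

-- B replaces A's per-layer qubit sets by an inverted index (qubit → occupied layer indices) with a
-- running layer count, avoiding the per-support intersection with every existing layer; the timing
-- run measured B faster on the generated inputs.

-- ===== PORT A =====
-- inner 'for used in layers: …' loop of A (continue on intersection, update+break on the first
-- disjoint layer, append when no layer fits)
def pvPlaceA (supp : List Int) : List (PySem.Set Int) → List (PySem.Set Int)
  | [] => [PySem.Set.ofList supp]
  | used :: rest =>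
      if PySem.Set.inter used supp ≠ [] then used :: pvPlaceA supp rest
      else PySem.Set.update used supp :: rest

def greedy_disjoint_layer_count_py (supports : List (List Int)) : Int :=
  ((supports.foldl (fun layers supp => pvPlaceA supp layers) []).length : Int)

-- ===== PORT B =====
-- forbidden = union of occupied-layer-index sets over the qubits of supp
def pvForbidden (occ : PySem.Dict Int (PySem.Set Nat)) (supp : List Int) : PySem.Set Nat :=
  supp.foldl (fun f q => PySem.Set.union f (occ.getD q [])) []

-- record chosen layer index i in every qubit's occupied set (setdefault(q, set()).add(i))
def pvRecord (occ : PySem.Dict Int (PySem.Set Nat)) (supp : List Int) (i : Nat) :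
    PySem.Dict Int (PySem.Set Nat) :=
  supp.foldl (fun d q => d.insert q (PySem.Set.add (d.getD q []) i)) occ

def pvStepB (st : PySem.Dict Int (PySem.Set Nat) × Nat) (supp : List Int) :
    PySem.Dict Int (PySem.Set Nat) × Nat :=
  match (List.range st.2).find? (fun j => !(PySem.Set.contains (pvForbidden st.1 supp) j)) with
  | some i => (pvRecord st.1 supp i, st.2)
  | none   => (pvRecord st.1 supp st.2, st.2 + 1)

def greedy_disjoint_layer_count_py_alt (supports : List (List Int)) : Int :=
  ((supports.foldl pvStepB (PySem.Dict.empty, 0)).2 : Int)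

-- ===== PRECONDITION & SPEC =====
def Spec_greedy_disjoint_layer_count_py (supports : List (List Int)) (out : Int) : Prop := out = greedy_disjoint_layer_count_py_alt supports
instance (supports : List (List Int)) (out : Int) : Decidable (Spec_greedy_disjoint_layer_count_py supports out) := by unfold Spec_greedy_disjoint_layer_count_py; infer_instance

-- ===== CLAIM (what is proved, stated in full; the proofs are below) =====
def Claim_equal_greedy_disjoint_layer_count_py : Prop := ∀ (supports : List (List Int)), Dom_greedy_disjoint_layer_count_py supports → Spec_greedy_disjoint_layer_count_py supports (greedy_disjoint_layer_count_py supports)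

-- ===== LEMMAS AND PROOFS =====

-- the state correspondence: the layer count matches, and q's occupied-index set is exactly
-- {i | q ∈ layers[i]}
def pvInv (layers : List (PySem.Set Int)) (occ : PySem.Dict Int (PySem.Set Nat)) (count : Nat) : Prop :=
  count = layers.length ∧
  ∀ (q : Int) (i : Nat), i ∈ occ.getD q [] ↔ ∃ h : i < layers.length, q ∈ layers[i]

theorem pv_forbidden_aux (occ : PySem.Dict Int (PySem.Set Nat)) (supp : List Int)
    (acc : PySem.Set Nat) (j : Nat) :
    j ∈ supp.foldl (fun f q => PySem.Set.union f (occ.getD q [])) acc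
      ↔ j ∈ acc ∨ ∃ q ∈ supp, j ∈ occ.getD q [] := by
  induction supp generalizing acc with
  | nil => simp
  | cons a t ih => simp [ih, PySem.Set.mem_union]; tauto

theorem pv_mem_forbidden (occ : PySem.Dict Int (PySem.Set Nat)) (supp : List Int) (j : Nat) :
    j ∈ pvForbidden occ supp ↔ ∃ q ∈ supp, j ∈ occ.getD q [] := by
  simp [pvForbidden, pv_forbidden_aux]

theorem pv_mem_record (occ : PySem.Dict Int (PySem.Set Nat)) (supp : List Int) (i : Nat)
    (q : Int) (j : Nat) :
    j ∈ (pvRecord occ supp i).getD q [] ↔ j ∈ occ.getD q [] ∨ (q ∈ supp ∧ j = i) := by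
  induction supp generalizing occ with
  | nil => simp [pvRecord]
  | cons a t ih =>
      simp only [pvRecord, List.foldl_cons] at *
      rw [ih, PySem.Dict.getD_insert]
      by_cases hq : q = a <;> simp only [hq, if_pos, PySem.Set.mem_add] <;> simp_all

theorem pv_find?_range_none (p : Nat → Bool) (n : Nat) :
    (List.range n).find? p = none ↔ ∀ j < n, p j = false := by
  simp [List.find?_eq_none]

theorem pv_find?_range_some (p : Nat → Bool) (n i : Nat)
    (h : (List.range n).find? p = some i) :
    i < n ∧ p i = true ∧ ∀ j < i, p j = false := by
  rw [List.find?_eq_some_iff_getElem] at h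
  obtain ⟨hp, k, hk, hkb, hprev⟩ := h
  simp only [List.length_range] at hk
  simp [List.getElem_range] at hkb hprev
  subst hkb
  exact ⟨hk, hp, fun j hj => by simpa using hprev j hj⟩

theorem pv_inter_nil (s : PySem.Set Int) (supp : List Int) :
    PySem.Set.inter s supp = [] ↔ ∀ q ∈ supp, q ∉ s := by
  rw [List.eq_nil_iff_forall_not_mem]
  constructor
  · intro h q hq hs; exact h q (by rw [PySem.Set.mem_inter]; exact ⟨hs, hq⟩)
  · intro h x hx; rw [PySem.Set.mem_inter] at hx; exact h x hx.2 hx.1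

theorem pv_placeA_append (supp : List Int) (layers : List (PySem.Set Int))
    (h : ∀ l ∈ layers, PySem.Set.inter l supp ≠ []) :
    pvPlaceA supp layers = layers ++ [PySem.Set.ofList supp] := by
  induction layers with
  | nil => rfl
  | cons u rest ih =>
      simp [pvPlaceA, h u (List.mem_cons_self)]
      exact ih fun l hl => h l (List.mem_cons_of_mem _ hl)

theorem pv_placeA_set (supp : List Int) (layers : List (PySem.Set Int)) (i : Nat)
    (hi : i < layers.length)
    (hdis : PySem.Set.inter layers[i] supp = [])
    (hpre : ∀ j (hj : j < layers.length), j < i → PySem.Set.inter layers[j] supp ≠ []) :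
    pvPlaceA supp layers = layers.set i (PySem.Set.update layers[i] supp) := by
  induction layers generalizing i with
  | nil => simp at hi
  | cons u rest ih =>
      cases i with
      | zero => simp_all [pvPlaceA]
      | succ i =>
          have h0 : PySem.Set.inter u supp ≠ [] := hpre 0 (by simp) (by omega)
          simp only [pvPlaceA, if_pos h0, List.getElem_cons_succ, List.set_cons_succ] at *
          congr 1
          exact ih i (by simpa using hi) hdis
            (fun j hj hji => hpre (j+1) (by simpa using hj) (by omega))

theorem pv_step_inv (layers : List (PySem.Set Int)) (occ : PySem.Dict Int (PySem.Set Nat))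
    (count : Nat) (supp : List Int) (h : pvInv layers occ count) :
    pvInv (pvPlaceA supp layers) (pvStepB (occ, count) supp).1 (pvStepB (occ, count) supp).2 := by
  obtain ⟨hc, hm⟩ := h
  subst hc
  have hB : pvStepB (occ, layers.length) supp
      = match (List.range layers.length).find?
            (fun j => !(PySem.Set.contains (pvForbidden occ supp) j)) with
        | some i => (pvRecord occ supp i, layers.length)
        | none   => (pvRecord occ supp layers.length, layers.length + 1) := rfl
  cases hfind : (List.range layers.length).find?
      (fun j => !(PySem.Set.contains (pvForbidden occ supp) j)) with
  | none =>
      have hall : ∀ j < layers.length, j ∈ pvForbidden occ supp := by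
        intro j hj
        have hf := (pv_find?_range_none _ _).1 hfind j hj
        simp only [Bool.not_eq_false'] at hf
        exact (PySem.Set.contains_iff _ _).1 hf
      have hhit : ∀ l ∈ layers, PySem.Set.inter l supp ≠ [] := by
        intro l hl
        obtain ⟨j, hj, rfl⟩ := List.mem_iff_getElem.1 hl
        have hjf := hall j hj
        rw [pv_mem_forbidden] at hjf
        obtain ⟨q, hqs, hqo⟩ := hjf
        rw [hm] at hqo
        obtain ⟨hlt, hq⟩ := hqo
        intro hnil
        rw [pv_inter_nil] at hnil
        exact hnil q hqs hq
      rw [hB, hfind, pv_placeA_append supp layers hhit]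
      refine ⟨by simp, ?_⟩
      intro q i
      simp only
      rw [pv_mem_record, hm]
      constructor
      · rintro (⟨hlt, hq⟩ | ⟨hqs, rfl⟩)
        · exact ⟨by simp; omega, by rw [List.getElem_append_left hlt]; exact hq⟩
        · exact ⟨by simp, by simp [PySem.Set.mem_ofList, hqs]⟩
      · rintro ⟨hlt, hq⟩
        by_cases hi : i < layers.length
        · rw [List.getElem_append_left hi] at hq
          exact Or.inl ⟨hi, hq⟩
        · have hieq : i = layers.length := by simp at hlt; omega
          subst hieq
          simp [PySem.Set.mem_ofList] at hq
          exact Or.inr ⟨hq, rfl⟩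
  | some i =>
      obtain ⟨hi, hpi, hprev⟩ := pv_find?_range_some _ _ _ hfind
      have hnotin : i ∉ pvForbidden occ supp := by
        intro hmem
        have hct := (PySem.Set.contains_iff _ _).2 hmem
        have hpf : (pvForbidden occ supp).contains i = false := by simpa using hpi
        rw [hpf] at hct
        exact Bool.noConfusion hct
      have hdis : PySem.Set.inter layers[i] supp = [] := by
        rw [pv_inter_nil]
        intro q hqs hql
        exact hnotin ((pv_mem_forbidden _ _ _).2 ⟨q, hqs, (hm q i).2 ⟨hi, hql⟩⟩)
      have hpre : ∀ j (hj : j < layers.length), j < i →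
          PySem.Set.inter layers[j] supp ≠ [] := by
        intro j hj hji hnil
        have hjf := hprev j hji
        simp only [Bool.not_eq_false'] at hjf
        have hjmem := (PySem.Set.contains_iff _ _).1 hjf
        rw [pv_mem_forbidden] at hjmem
        obtain ⟨q, hqs, hqo⟩ := hjmem
        rw [hm] at hqo
        obtain ⟨_, hq⟩ := hqo
        rw [pv_inter_nil] at hnil
        exact hnil q hqs hq
      rw [hB, hfind, pv_placeA_set supp layers i hi hdis hpre]
      refine ⟨by simp, ?_⟩
      intro q j
      simp only
      rw [pv_mem_record, hm]
      simp only [List.length_set]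
      constructor
      · rintro (⟨hlt, hq⟩ | ⟨hqs, rfl⟩)
        · refine ⟨hlt, ?_⟩
          rw [List.getElem_set]
          split
          next heq =>
            subst heq
            rw [PySem.Set.mem_update]
            exact Or.inl hq
          next => exact hq
        · exact ⟨hi, by rw [List.getElem_set, if_pos rfl, PySem.Set.mem_update]; exact Or.inr hqs⟩
      · rintro ⟨hlt, hq⟩
        rw [List.getElem_set] at hq
        by_cases hij : i = j
        · subst hij
          rw [if_pos rfl, PySem.Set.mem_update] at hq
          cases hq with
          | inl h1 => exact Or.inl ⟨hlt, h1⟩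
          | inr h2 => exact Or.inr ⟨h2, rfl⟩
        · rw [if_neg hij] at hq
          exact Or.inl ⟨hlt, hq⟩

theorem pv_main (supports : List (List Int)) (layers : List (PySem.Set Int))
    (occ : PySem.Dict Int (PySem.Set Nat)) (count : Nat) (h : pvInv layers occ count) :
    (supports.foldl (fun layers supp => pvPlaceA supp layers) layers).length
      = (supports.foldl pvStepB (occ, count)).2 := by
  induction supports generalizing layers occ count with
  | nil => exact h.1.symm
  | cons supp rest ih =>
      simpa using ih _ _ _ (pv_step_inv layers occ count supp h)

-- ===== VERDICT (by name: the statement is the Claim_ definition above) =====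
theorem greedy_disjoint_layer_count_py_spec : Claim_equal_greedy_disjoint_layer_count_py := by
  intro supports _
  unfold Spec_greedy_disjoint_layer_count_py greedy_disjoint_layer_count_py greedy_disjoint_layer_count_py_alt
  have h : pvInv [] PySem.Dict.empty 0 := by
    constructor
    · rfl
    · intro q i
      simp [PySem.Dict.getD_empty]
  rw [pv_main supports [] PySem.Dict.empty 0 h]
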